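-- pv_equiv track=rewrite | github.com/RockPie/H2GCROC_Auto | packetlib/data_packet.py | sort_and_group_40bytes
-- ===== SOURCE A (Python) =====
-- from itertools import groupby
--
-- def sort_and_group_40bytes(data):
--     # Helper function to get the key for sorting and grouping
--     def get_key(item):
--         return item[0:3], item[4:7]  # (bytes 1-3, bytes 5-7)
--
--     # Sort the data first; necessary for groupby to work correctly
--     data_sorted = sorted(data, key=lambda x: (x[0:3], x[4:7], x[3]))
--
--     # Use groupby to group data by bytes 1-3 and 5-7
--     grouped_data = []
--     for ((bytes_1_3, bytes_5_7), items) in groupby(data_sorted, key=get_key):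
--         sub_group = sorted(list(items), key=lambda x: x[3])  # Ensure fourth byte is sorted from 0x00 to 0x03
--         grouped_data.append(sub_group)
--
--     return grouped_data
-- ===== SOURCE B (Python) =====
-- def sort_and_group_40bytes(data):
--     # Partition into hash buckets in one pass, then sort keys and each bucket.
--     buckets = {}
--     for item in data:
--         key = (tuple(item[0:3]), tuple(item[4:7]))
--         buckets.setdefault(key, []).append(item)
--     return [sorted(buckets[k], key=lambda x: x[3]) for k in sorted(buckets)]
-- ===== Notes on version B (the rewrite author's own statement) =====
-- stated objective: alternative
-- what changed: Replaces the global sort plus itertools.groupby scan with a one-pass dict partition into buckets keyed by (bytes 1-3, bytes 5-7), then emits buckets in sorted key order, each bucket sorted by byte 4.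
import Mathlib
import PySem

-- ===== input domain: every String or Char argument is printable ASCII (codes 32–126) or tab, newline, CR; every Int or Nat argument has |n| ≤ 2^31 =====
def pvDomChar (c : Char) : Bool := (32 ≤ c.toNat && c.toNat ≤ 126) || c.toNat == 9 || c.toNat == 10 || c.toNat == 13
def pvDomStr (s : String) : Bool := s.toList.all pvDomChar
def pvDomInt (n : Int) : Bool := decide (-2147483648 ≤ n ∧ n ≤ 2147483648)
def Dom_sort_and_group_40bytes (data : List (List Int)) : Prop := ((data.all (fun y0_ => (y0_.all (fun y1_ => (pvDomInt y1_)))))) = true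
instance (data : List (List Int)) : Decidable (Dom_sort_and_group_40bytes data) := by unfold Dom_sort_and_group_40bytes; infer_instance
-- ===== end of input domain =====

-- B partitions the data into dict buckets keyed by (bytes 1-3, bytes 5-7) in one pass, then emits
-- buckets in sorted key order, each sorted by byte 4, instead of A's global sort + groupby scan
-- (objective: alternative algorithm, same asymptotic cost).

-- ===== PORT A =====
-- x[0:3]
def pvS1 (x : List Int) : List Int := PySem.List.slice x (some 0) (some 3)
-- x[4:7]
def pvS2 (x : List Int) : List Int := PySem.List.slice x (some 4) (some 7)
-- x[3]; Pre_ guarantees the index is in range, so the default is never used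
def pvB4 (x : List Int) : Int := PySem.List.pyGetD x 3 0
-- the sort key (x[0:3], x[4:7], x[3]); the Python 3-tuple of (list, list, int) is encoded as the
-- 3-element List (List Int) [x[0:3], x[4:7], [x[3]]], whose lexicographic order is EXACTLY the
-- Python tuple comparison (components compared left to right, lists lexicographically)
def pvKey3 (x : List Int) : List (List Int) := [pvS1 x, pvS2 x, [pvB4 x]]
-- get_key(item) = (item[0:3], item[4:7]) (as a pair)
def pvGK (x : List Int) : List Int × List Int := (pvS1 x, pvS2 x)

-- the groupby loop of A: split the (already sorted) list into maximal runs of equal get_key and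
-- sort each run by x[3] (exact: itertools.groupby groups consecutive equal keys)
def pvRunsA : List (List Int) → List (List (List Int))
  | [] => []
  | x :: xs =>
      PySem.List.sorted (x :: xs.takeWhile (fun y => pvGK y == pvGK x)) pvB4
        :: pvRunsA (xs.dropWhile (fun y => pvGK y == pvGK x))
  termination_by l => l.length
  decreasing_by
    simp only [List.length_cons]
    exact Nat.lt_succ_of_le (List.length_dropWhile_le _ _)

def sort_and_group_40bytes (data : List (List Int)) : List (List (List Int)) :=
  pvRunsA (PySem.List.sorted data pvKey3)

-- ===== PORT B =====
def sort_and_group_40bytes_alt (data : List (List Int)) : List (List (List Int)) :=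
  -- buckets.setdefault(key, []).append(item)
  let buckets := data.foldl
    (fun d item => d.insert (pvGK item) (d.getD (pvGK item) [] ++ [item]))
    (PySem.Dict.empty)
  -- [sorted(buckets[k], key=lambda x: x[3]) for k in sorted(buckets)]
  (PySem.List.sorted2 buckets.keys Prod.fst Prod.snd).map
    (fun k => PySem.List.sorted (buckets.getD k []) pvB4)

-- ===== PRECONDITION & SPEC =====
-- Pre_ excludes exactly the inputs where the Python A raises: an item of length < 4 makes the
-- sort key expression x[3] raise IndexError (in A and in B alike).
def Pre_sort_and_group_40bytes (data : List (List Int)) : Prop := ∀ x ∈ data, 4 ≤ x.length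
instance (data : List (List Int)) : Decidable (Pre_sort_and_group_40bytes data) := by
  unfold Pre_sort_and_group_40bytes; infer_instance

def pvWitness_sort_and_group_40bytes : List (List Int) :=
  [[1, 2, 3, 1, 5, 6, 7, 8], [1, 2, 3, 0, 5, 6, 7, 9], [0, 2, 3, 2, 5, 6, 7, 1]]

def Spec_sort_and_group_40bytes (data : List (List Int)) (out : List (List (List Int))) : Prop := out = sort_and_group_40bytes_alt data
instance (data : List (List Int)) (out : List (List (List Int))) : Decidable (Spec_sort_and_group_40bytes data out) := by unfold Spec_sort_and_group_40bytes; infer_instance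

-- ===== CLAIM (what is proved, stated in full; the proofs are below) =====
def Claim_equal_sort_and_group_40bytes : Prop := ∀ (data : List (List Int)), Dom_sort_and_group_40bytes data → Pre_sort_and_group_40bytes data → Spec_sort_and_group_40bytes data (sort_and_group_40bytes data)

-- ===== LEMMAS AND PROOFS =====

-- the pair key embedded as a 2-element list (prefix of pvKey3)
def pvE (k : List Int × List Int) : List (List Int) := [k.1, k.2]

lemma pvE_inj : Function.Injective pvE := by
  intro a b h
  simp only [pvE, List.cons.injEq, and_true] at h
  exact Prod.ext h.1 h.2

lemma pvE_lt_iff (k k' : List Int × List Int) :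
    pvE k < pvE k' ↔ (k.1 < k'.1 ∨ (k.1 = k'.1 ∧ k.2 < k'.2)) := by
  simp only [pvE, List.cons_lt_cons_iff]
  constructor
  · rintro (h | ⟨h1, h2 | ⟨h2, h3⟩⟩)
    · exact Or.inl h
    · exact Or.inr ⟨h1, h2⟩
    · exact absurd h3 (by exact List.not_lt_nil _)
  · rintro (h | ⟨h1, h2⟩)
    · exact Or.inl h
    · exact Or.inr ⟨h1, Or.inl h2⟩

lemma pvKey3_lt_iff (x y : List Int) :
    pvKey3 x < pvKey3 y ↔ (pvE (pvGK x) < pvE (pvGK y) ∨ (pvGK x = pvGK y ∧ pvB4 x < pvB4 y)) := by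
  rw [pvE_lt_iff]
  simp only [pvKey3, pvGK, List.cons_lt_cons_iff, Prod.mk.injEq]
  constructor
  · rintro (h | ⟨h1, h2 | ⟨h2, (h3 | ⟨h3, h4⟩) | ⟨h3, h4⟩⟩⟩)
    · exact Or.inl (Or.inl h)
    · exact Or.inl (Or.inr ⟨h1, h2⟩)
    · exact Or.inr ⟨⟨h1, h2⟩, h3⟩
    · exact absurd h4 (List.not_lt_nil _)
    · exact absurd h4 (List.not_lt_nil _)
  · rintro ((h | ⟨h1, h2⟩) | ⟨⟨h1, h2⟩, h3⟩)
    · exact Or.inl h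
    · exact Or.inr ⟨h1, Or.inl h2⟩
    · exact Or.inr ⟨h1, Or.inr ⟨h2, Or.inl (Or.inl h3)⟩⟩

lemma pvE_le_of_key3_le {x y : List Int} (h : pvKey3 x ≤ pvKey3 y) :
    pvE (pvGK x) ≤ pvE (pvGK y) := by
  rcases lt_or_eq_of_le h with h | h
  · rcases (pvKey3_lt_iff x y).mp h with h | ⟨h, _⟩
    · exact le_of_lt h
    · exact le_of_eq (by rw [h])
  · simp only [pvKey3, List.cons.injEq] at h
    have : pvGK x = pvGK y := by simp [pvGK, h.1, h.2.1]
    exact le_of_eq (by rw [this])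

-- the comparator of A's sort
def pvCmp (a b : List Int) : Bool := decide (pvKey3 a < pvKey3 b)

-- the default LT/DecidableLT instances on the key types versus the LinearOrder-derived ones
-- used by the PySem order lemmas (propositionally equal)
lemma pv_sortedL_inst {α : Type} (xs : List α) (key : α → List (List Int)) :
    PySem.List.sorted xs key
      = @PySem.List.sorted _ _ List.instLinearOrder.toLT LinearOrder.toDecidableLT xs key false := by
  congr 1

lemma pv_sortedI_inst (xs : List (List Int)) (key : List Int → Int) :
    PySem.List.sorted xs key
      = @PySem.List.sorted _ _ Int.instLinearOrder.toLT LinearOrder.toDecidableLT xs key false := by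
  congr 1

lemma pv_sorted_pairwise (xs : List (List Int)) :
    (PySem.List.sorted xs pvKey3).Pairwise (fun a b => pvKey3 a ≤ pvKey3 b) := by
  rw [pv_sortedL_inst]
  exact PySem.List.sorted_pairwise xs pvKey3

-- ---- comparator congruence on a fixed carrier ----
lemma pv_insertBy_congr {α : Type} (f g : α → α → Bool) (x : α) (s : List α)
    (h : ∀ b ∈ s, f x b = g x b) :
    PySem.List.insertBy f x s = PySem.List.insertBy g x s := by
  induction s with
  | nil => rfl
  | cons a as ih =>
      have ha := h a (List.mem_cons_self)
      simp only [PySem.List.insertBy, ha]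
      split
      · rfl
      · exact congrArg (a :: ·) (ih (fun b hb => h b (List.mem_cons_of_mem _ hb)))

lemma pv_foldl_insertBy_congr {α : Type} (f g : α → α → Bool) (xs acc : List α)
    (h : ∀ a b, (a ∈ xs ∨ a ∈ acc) → (b ∈ xs ∨ b ∈ acc) → f a b = g a b) :
    xs.foldl (fun acc x => PySem.List.insertBy f x acc) acc
      = xs.foldl (fun acc x => PySem.List.insertBy g x acc) acc := by
  induction xs generalizing acc with
  | nil => rfl
  | cons x xs ih =>
      simp only [List.foldl_cons]
      rw [pv_insertBy_congr f g x acc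
        (fun b hb => h x b (Or.inl List.mem_cons_self) (Or.inr hb))]
      refine ih _ (fun a b ha hb => h a b ?_ ?_)
      · rcases ha with ha | ha
        · exact Or.inl (List.mem_cons_of_mem _ ha)
        · rcases (PySem.List.mem_insertBy _ _ _ _).mp ha with rfl | ha
          · exact Or.inl List.mem_cons_self
          · exact Or.inr ha
      · rcases hb with hb | hb
        · exact Or.inl (List.mem_cons_of_mem _ hb)
        · rcases (PySem.List.mem_insertBy _ _ _ _).mp hb with rfl | hb
          · exact Or.inl List.mem_cons_self
          · exact Or.inr hb

-- on a list whose elements all share one group key, sorting by the full key is sorting by byte 4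
lemma pv_sorted_key3_eq_sorted_b4 (q : List (List Int)) (k : List Int × List Int)
    (hq : ∀ x ∈ q, pvGK x = k) :
    PySem.List.sorted q pvKey3 = PySem.List.sorted q pvB4 := by
  rw [PySem.List.sorted_eq_foldl_insertBy, PySem.List.sorted_eq_foldl_insertBy]
  refine pv_foldl_insertBy_congr _ _ q [] (fun a b ha hb => ?_)
  rcases ha with ha | ha
  · rcases hb with hb | hb
    · have hka := hq a ha
      have hkb := hq b hb
      rw [decide_eq_decide, pvKey3_lt_iff, hka, hkb]
      simp
    · exact absurd hb (List.not_mem_nil)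
  · exact absurd ha (List.not_mem_nil)

-- ---- stability: filtering commutes with the stable sort ----
lemma pv_filter_insertBy_neg (p : List Int → Bool) (x : List Int) (s : List (List Int))
    (hx : p x = false) :
    (PySem.List.insertBy pvCmp x s).filter p = s.filter p := by
  induction s with
  | nil => simp [PySem.List.insertBy, hx]
  | cons a as ih =>
      simp only [PySem.List.insertBy]
      split
      · simp [List.filter_cons, hx]
      · rw [List.filter_cons, List.filter_cons]
        split <;> simp [ih]

lemma pv_filter_insertBy_pos (p : List Int → Bool) (x : List Int) (s : List (List Int))
    (hs : s.Pairwise (fun a b => pvKey3 a ≤ pvKey3 b)) (hx : p x = true) :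
    (PySem.List.insertBy pvCmp x s).filter p = PySem.List.insertBy pvCmp x (s.filter p) := by
  induction s with
  | nil => simp [PySem.List.insertBy, hx]
  | cons a as ih =>
      have ha : ∀ b ∈ as, pvKey3 a ≤ pvKey3 b := (List.pairwise_cons.mp hs).1
      have htl := (List.pairwise_cons.mp hs).2
      simp only [PySem.List.insertBy]
      split
      · rename_i hc
        rw [List.filter_cons_of_pos hx]
        cases hfl : (a :: as).filter p with
        | nil => simp [PySem.List.insertBy]
        | cons b bs =>
            have hb' : b ∈ a :: as := List.mem_of_mem_filter (hfl ▸ List.mem_cons_self)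
            have hab : pvKey3 a ≤ pvKey3 b := by
              rcases List.mem_cons.mp hb' with rfl | hb''
              · exact le_refl _
              · exact ha b hb''
            have hxb : pvCmp x b = true :=
              decide_eq_true (lt_of_lt_of_le (of_decide_eq_true hc) hab)
            simp [PySem.List.insertBy, hxb]
      · rename_i hc
        rw [List.filter_cons, List.filter_cons]
        by_cases hp : p a = true
        · rw [if_pos hp, if_pos hp]
          have h2 : PySem.List.insertBy pvCmp x (a :: as.filter p)
              = a :: PySem.List.insertBy pvCmp x (as.filter p) := by
            simp [PySem.List.insertBy, hc]
          rw [h2, ih htl]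
        · rw [if_neg hp, if_neg hp]
          exact ih htl

lemma pv_filter_sorted (data : List (List Int)) (p : List Int → Bool) :
    (PySem.List.sorted data pvKey3).filter p = PySem.List.sorted (data.filter p) pvKey3 := by
  have hsa : ∀ (l : List (List Int)) (x : List Int),
      PySem.List.sorted (l ++ [x]) pvKey3 = PySem.List.insertBy pvCmp x (PySem.List.sorted l pvKey3) := by
    intro l x
    rw [PySem.List.sorted_eq_foldl_insertBy, PySem.List.sorted_eq_foldl_insertBy, List.foldl_append]
    rfl
  induction data using List.reverseRecOn with
  | nil => rfl
  | append_singleton data x ih =>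
      rw [hsa, List.filter_append]
      cases hx : p x with
      | true =>
          have hfx : List.filter p [x] = [x] := by simp [hx]
          rw [hfx, hsa, ← ih]
          exact pv_filter_insertBy_pos p x _ (pv_sorted_pairwise data) hx
      | false =>
          have hfx : List.filter p [x] = [] := by simp [hx]
          rw [hfx, List.append_nil, ← ih]
          exact pv_filter_insertBy_neg p x _ hx

-- ---- dedup over a fold of Set.add ----
lemma pv_foldl_add_of_mem (l acc : List (List Int × List Int)) (h : ∀ a ∈ l, a ∈ acc) :
    l.foldl PySem.Set.add acc = acc := by
  induction l generalizing acc with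
  | nil => rfl
  | cons a l ih =>
      have ha : PySem.Set.contains acc a = true :=
        List.elem_eq_true_of_mem (h a List.mem_cons_self)
      simp only [List.foldl_cons, PySem.Set.add, if_pos ha]
      exact ih acc (fun b hb => h b (List.mem_cons_of_mem _ hb))

lemma pv_foldl_add_cons (l acc : List (List Int × List Int)) (c : List Int × List Int)
    (h : c ∉ l) :
    l.foldl PySem.Set.add (c :: acc) = c :: l.foldl PySem.Set.add acc := by
  induction l generalizing acc with
  | nil => rfl
  | cons y l ih =>
      have hyc : y ≠ c := fun e => h (List.mem_cons.mpr (Or.inl e.symm))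
      have hadd : PySem.Set.add (c :: acc) y = c :: PySem.Set.add acc y := by
        by_cases hy : y ∈ acc <;> simp [PySem.Set.add, hyc, hy]
      simp only [List.foldl_cons, hadd]
      exact ih _ (fun e => h (List.mem_cons_of_mem _ e))

lemma pv_dedup_block (c : List Int × List Int) (l₁ l₂ : List (List Int × List Int))
    (h1 : ∀ a ∈ l₁, a = c) (h2 : c ∉ l₂) :
    PySem.List.dedup (c :: (l₁ ++ l₂)) = c :: PySem.List.dedup l₂ := by
  rw [PySem.List.dedup_eq_ofList, PySem.List.dedup_eq_ofList,
    PySem.Set.ofList_eq_foldl, PySem.Set.ofList_eq_foldl]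
  have hadd : PySem.Set.add [] c = [c] := rfl
  calc (c :: (l₁ ++ l₂)).foldl PySem.Set.add []
      = (l₁ ++ l₂).foldl PySem.Set.add [c] := by
        simp only [List.foldl_cons, hadd]
    _ = l₂.foldl PySem.Set.add [c] := by
        rw [List.foldl_append,
          pv_foldl_add_of_mem l₁ [c] (fun a ha => by rw [h1 a ha]; exact List.mem_cons_self)]
    _ = c :: l₂.foldl PySem.Set.add [] := pv_foldl_add_cons l₂ [] c h2

lemma pv_dedup_sublist (xs : List (List Int × List Int)) :
    (PySem.List.dedup xs).Sublist xs := by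
  have aux : ∀ (l acc : List (List Int × List Int)),
      (l.foldl PySem.Set.add acc).Sublist (acc ++ l) := by
    intro l
    induction l with
    | nil => intro acc; simp
    | cons y l ih =>
        intro acc
        simp only [List.foldl_cons]
        refine (ih (PySem.Set.add acc y)).trans ?_
        by_cases hy : y ∈ acc
        · have h1 : PySem.Set.contains acc y = true := List.elem_eq_true_of_mem hy
          simp only [PySem.Set.add, if_pos h1]
          exact List.Sublist.append_left (List.sublist_cons_self _ _) acc
        · have h1 : ¬ PySem.Set.contains acc y = true := fun hc =>
            hy (List.mem_of_elem_eq_true hc)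
          simp only [PySem.Set.add, if_neg h1]
          rw [List.append_assoc]
          exact List.Sublist.refl _
  rw [PySem.List.dedup_eq_ofList, PySem.Set.ofList_eq_foldl]
  simpa using aux xs []

-- ---- the groupby loop on a sorted list is a per-key partition ----
lemma pv_dropWhile_head (p : List Int → Bool) (l : List (List Int)) (y : List Int)
    (ys : List (List Int)) (h : l.dropWhile p = y :: ys) : p y = false := by
  induction l with
  | nil => simp at h
  | cons a l ih =>
      rw [List.dropWhile_cons] at h
      by_cases hp : p a = true
      · rw [if_pos hp] at h; exact ih h
      · rw [if_neg hp] at h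
        cases h
        simpa using hp

lemma pv_runsA_eq (ds : List (List Int)) (hs : ds.Pairwise (fun a b => pvKey3 a ≤ pvKey3 b)) :
    pvRunsA ds = (PySem.List.dedup (ds.map pvGK)).map
      (fun k => PySem.List.sorted (ds.filter (fun x => pvGK x == k)) pvB4) := by
  induction ds using pvRunsA.induct with
  | case1 => simp [pvRunsA]
  | case2 x xs ih =>
      have hx_all : ∀ b ∈ xs, pvKey3 x ≤ pvKey3 b := (List.pairwise_cons.mp hs).1
      have hxs_pw : xs.Pairwise (fun a b => pvKey3 a ≤ pvKey3 b) := (List.pairwise_cons.mp hs).2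
      have hsplit : xs.takeWhile (fun y => pvGK y == pvGK x)
          ++ xs.dropWhile (fun y => pvGK y == pvGK x) = xs := List.takeWhile_append_dropWhile
      have hrun : ∀ y ∈ xs.takeWhile (fun y => pvGK y == pvGK x), pvGK y = pvGK x := by
        intro y hy
        have h' := List.mem_takeWhile_imp hy
        exact eq_of_beq h'
      have hrest_pw : (xs.dropWhile (fun y => pvGK y == pvGK x)).Pairwise
          (fun a b => pvKey3 a ≤ pvKey3 b) := hxs_pw.sublist (List.dropWhile_sublist _)
      have hrest_ne : ∀ z ∈ xs.dropWhile (fun y => pvGK y == pvGK x), pvGK z ≠ pvGK x := by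
        cases hr : xs.dropWhile (fun y => pvGK y == pvGK x) with
        | nil => intro z hz; simp at hz
        | cons y ys =>
            intro z hz
            have hy_false : (fun y => pvGK y == pvGK x) y = false :=
              pv_dropWhile_head _ xs y ys hr
            have hy_ne : pvGK y ≠ pvGK x := by
              intro e; simp [e] at hy_false
            have hy_mem : y ∈ xs :=
              (List.dropWhile_sublist _).subset (hr ▸ List.mem_cons_self)
            have hxy : pvE (pvGK x) < pvE (pvGK y) :=
              lt_of_le_of_ne (pvE_le_of_key3_le (hx_all y hy_mem))
                (fun e => hy_ne (pvE_inj e).symm)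
            rcases List.mem_cons.mp hz with rfl | hz'
            · exact hy_ne
            · have hyz : pvKey3 y ≤ pvKey3 z := (List.pairwise_cons.mp (hr ▸ hrest_pw)).1 z hz'
              have hlt : pvE (pvGK x) < pvE (pvGK z) :=
                lt_of_lt_of_le hxy (pvE_le_of_key3_le hyz)
              exact fun e => absurd (e ▸ hlt) (lt_irrefl _)
      have hmap : (x :: xs).map pvGK
          = pvGK x :: ((xs.takeWhile (fun y => pvGK y == pvGK x)).map pvGK
              ++ (xs.dropWhile (fun y => pvGK y == pvGK x)).map pvGK) := by
        rw [List.map_cons, ← List.map_append, hsplit]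
      have hded := pv_dedup_block (pvGK x)
        ((xs.takeWhile (fun y => pvGK y == pvGK x)).map pvGK)
        ((xs.dropWhile (fun y => pvGK y == pvGK x)).map pvGK)
        (fun a ha => by
          obtain ⟨y, hy, rfl⟩ := List.mem_map.mp ha
          exact hrun y hy)
        (fun hmem => by
          obtain ⟨z, hz, he⟩ := List.mem_map.mp hmem
          exact hrest_ne z hz he)
      simp only [pvRunsA]
      rw [hmap, hded, List.map_cons]
      congr 1
      · have hfe : (x :: xs).filter (fun z => pvGK z == pvGK x)
            = x :: xs.takeWhile (fun y => pvGK y == pvGK x) := by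
          rw [List.filter_cons_of_pos (by simp)]
          congr 1
          conv_lhs => rw [← hsplit]
          rw [List.filter_append,
            List.filter_eq_self.mpr (fun y hy => by simp [hrun y hy]),
            List.filter_eq_nil_iff.mpr (fun z hz => by simp [hrest_ne z hz]),
            List.append_nil]
        rw [hfe]
      · rw [ih hrest_pw]
        apply List.map_congr_left
        intro k hk
        have hkne : k ≠ pvGK x := by
          obtain ⟨z, hz, rfl⟩ := List.mem_map.mp ((PySem.List.mem_dedup _ _).mp hk)
          exact hrest_ne z hz
        have hf1 : (xs.takeWhile (fun y => pvGK y == pvGK x)).filter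
            (fun z => pvGK z == k) = [] :=
          List.filter_eq_nil_iff.mpr (fun z hz => by
            have hzz := hrun z hz
            simp only [hzz, beq_iff_eq]
            exact fun e => hkne e.symm)
        congr 1
        rw [List.filter_cons_of_neg (by simp; exact fun e => hkne e.symm)]
        conv_rhs => rw [← hsplit]
        rw [List.filter_append, hf1, List.nil_append]

-- ---- the key list: dedup of the sorted data's keys = sorted dedup of the data's keys ----
lemma pv_keys_eq (data : List (List Int)) :
    PySem.List.dedup ((PySem.List.sorted data pvKey3).map pvGK)
      = PySem.List.sorted (PySem.List.dedup (data.map pvGK)) pvE := by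
  rw [pv_sortedL_inst (PySem.List.dedup (data.map pvGK)) pvE]
  refine (PySem.List.sorted_eq_of_perm_of_pairwise_lt _ _ pvE ?_ ?_).symm
  · refine (List.perm_ext_iff_of_nodup (PySem.List.nodup_dedup _) (PySem.List.nodup_dedup _)).mpr ?_
    intro k
    simp [List.mem_map, PySem.List.mem_sorted]
  · have h1 : ((PySem.List.sorted data pvKey3).map pvGK).Pairwise (fun a b => pvE a ≤ pvE b) :=
      (List.pairwise_map).mpr ((pv_sorted_pairwise data).imp (fun h => pvE_le_of_key3_le h))
    have h2 := h1.sublist (pv_dedup_sublist _)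
    have h3 : (PySem.List.dedup ((PySem.List.sorted data pvKey3).map pvGK)).Nodup :=
      PySem.List.nodup_dedup _
    exact (h2.and h3).imp (fun h => lt_of_le_of_ne h.1 (fun e => h.2 (pvE_inj e)))

-- ---- B's dict ----
lemma pv_dict_getD (l : List (List Int)) (d : PySem.Dict (List Int × List Int) (List (List Int)))
    (k : List Int × List Int) :
    (l.foldl (fun d item => d.insert (pvGK item) (d.getD (pvGK item) [] ++ [item])) d).getD k []
      = d.getD k [] ++ l.filter (fun x => pvGK x == k) := by
  induction l generalizing d with
  | nil => simp
  | cons a l ih =>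
      simp only [List.foldl_cons]
      rw [ih, PySem.Dict.getD_insert]
      by_cases hk : k = pvGK a
      · rw [if_pos hk, List.filter_cons_of_pos (by simp [hk]), hk]
        simp
      · rw [if_neg hk, List.filter_cons_of_neg (by simp; exact fun e => hk e.symm)]

lemma pv_keys_insert (d : PySem.Dict (List Int × List Int) (List (List Int)))
    (k : List Int × List Int) (v : List (List Int)) :
    (d.insert k v).keys = PySem.Set.add d.keys k := by
  by_cases hc : d.contains k = true
  · have hmem : k ∈ d.keys := by
      obtain ⟨p, hp, he⟩ := List.any_eq_true.mp hc
      exact List.mem_map.mpr ⟨p, hp, eq_of_beq he⟩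
    have hadd : PySem.Set.add d.keys k = d.keys := by simp [PySem.Set.add, hmem]
    rw [hadd]
    simp only [PySem.Dict.insert, if_pos hc, PySem.Dict.keys, List.map_map]
    apply List.map_congr_left
    intro p hp
    by_cases hpk : p.1 = k <;> simp [hpk]
  · have hmem : k ∉ d.keys := by
      intro hkm
      obtain ⟨p, hp, he⟩ := List.mem_map.mp hkm
      exact hc (List.any_eq_true.mpr ⟨p, hp, by simp [he]⟩)
    have hadd : PySem.Set.add d.keys k = d.keys ++ [k] := by simp [PySem.Set.add, hmem]
    rw [hadd]
    simp [PySem.Dict.insert, hc, PySem.Dict.keys]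

lemma pv_dict_keys (l : List (List Int)) (d : PySem.Dict (List Int × List Int) (List (List Int))) :
    (l.foldl (fun d item => d.insert (pvGK item) (d.getD (pvGK item) [] ++ [item])) d).keys
      = (l.map pvGK).foldl PySem.Set.add d.keys := by
  induction l generalizing d with
  | nil => rfl
  | cons a l ih =>
      simp only [List.foldl_cons, List.map_cons]
      rw [ih, pv_keys_insert]

lemma pv_sorted2_eq_sorted_e (ks : List (List Int × List Int)) :
    PySem.List.sorted2 ks Prod.fst Prod.snd = PySem.List.sorted ks pvE := by
  have h1 : PySem.List.sorted2 ks Prod.fst Prod.snd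
      = ks.foldl (fun acc k => PySem.List.insertBy
          (fun a b => decide (a.1 < b.1) || (!decide (b.1 < a.1) && decide (a.2 < b.2))) k acc)
        [] := rfl
  rw [h1, PySem.List.sorted_eq_foldl_insertBy]
  refine pv_foldl_insertBy_congr _ _ ks [] (fun a b _ _ => ?_)
  rcases lt_trichotomy a.1 b.1 with h | h | h
  · simp [h, pvE_lt_iff]
  · simp [h, pvE_lt_iff]
  · have hn1 : ¬ a.1 < b.1 := asymm h
    have hn2 : a.1 ≠ b.1 := (ne_of_lt h).symm
    simp [pvE_lt_iff, h, hn1, hn2]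

lemma pv_sorted_b4_idem (q : List (List Int)) :
    PySem.List.sorted (PySem.List.sorted q pvB4) pvB4 = PySem.List.sorted q pvB4 := by
  rw [pv_sortedI_inst q pvB4, pv_sortedI_inst _ pvB4]
  exact PySem.List.sorted_sorted q pvB4

-- ---- the two sides reduced to the same canonical form ----
lemma pv_A_canon (data : List (List Int)) :
    sort_and_group_40bytes data
      = (PySem.List.sorted (PySem.List.dedup (data.map pvGK)) pvE).map
          (fun k => PySem.List.sorted (data.filter (fun x => pvGK x == k)) pvB4) := by
  show pvRunsA (PySem.List.sorted data pvKey3) = _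
  rw [pv_runsA_eq _ (pv_sorted_pairwise data), pv_keys_eq]
  apply List.map_congr_left
  intro k _
  rw [pv_filter_sorted data (fun x => pvGK x == k),
    pv_sorted_key3_eq_sorted_b4 _ k (fun x hx => by
      have h' := List.of_mem_filter hx
      exact eq_of_beq h'),
    pv_sorted_b4_idem]

lemma pv_B_canon (data : List (List Int)) :
    sort_and_group_40bytes_alt data
      = (PySem.List.sorted (PySem.List.dedup (data.map pvGK)) pvE).map
          (fun k => PySem.List.sorted (data.filter (fun x => pvGK x == k)) pvB4) := by
  simp only [sort_and_group_40bytes_alt]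
  rw [pv_dict_keys data PySem.Dict.empty]
  have hke : (PySem.Dict.empty : PySem.Dict (List Int × List Int) (List (List Int))).keys
      = [] := rfl
  rw [hke, ← PySem.Set.ofList_eq_foldl, ← PySem.List.dedup_eq_ofList, pv_sorted2_eq_sorted_e]
  apply List.map_congr_left
  intro k _
  rw [pv_dict_getD data PySem.Dict.empty k]
  rfl

-- ===== VERDICT (by name: the statement is the Claim_ definition above) =====
theorem sort_and_group_40bytes_spec : Claim_equal_sort_and_group_40bytes := by
  intro data _ _
  show sort_and_group_40bytes data = sort_and_group_40bytes_alt data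
  rw [pv_A_canon, pv_B_canon]
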